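-- pv_equiv track=rewrite | github.com/gabrielmcg44/cracking-the-code | chapter 16/16.20/16.20.py | make_code_dict
-- ===== SOURCE A (Python) =====
-- def letter_to_code(letter):
--     if letter in {"a", "b", "c"}:
--         return "2"
--     elif letter in {"d", "e", "f"}:
--         return "3"
--     elif letter in {"g", "h", "i"}:
--         return "4"
--     elif letter in {"j", "k", "l"}:
--         return "5"
--     elif letter in {"m", "n", "o"}:
--         return "6"
--     elif letter in {"p", "q", "r", "s"}:
--         return "7"
--     elif letter in {"t", "u", "v"}:
--         return "8"
--     elif letter in {"w", "x", "y", "z"}: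
--         return "9"
--
-- def word_to_code(word):
--     code = ""
--     for letter in word:
--         code += letter_to_code(letter)
--
--     return code
--
-- def make_code_dict(words):
--     code_dict = {}
--     for word in words:
--         code = word_to_code(word)
--         if code not in code_dict.keys():
--             code_dict[code] = [word]
--         else:
--             code_dict[code].append(word)
--
--     return code_dict
-- ===== SOURCE B (Python) =====
-- KEYPAD = "22233344455566677778889999"
--
-- def make_code_dict(words):
--     codes = ["".join(KEYPAD[ord(c) - 97] for c in w) for w in words]
--     return {code: [w for w, k in zip(words, codes) if k == code]
--             for code in dict.fromkeys(codes)}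
-- ===== Notes on version B (the rewrite author's own statement) =====
-- stated objective: alternative
-- what changed: Replaced the branch-chain letter lookup plus single-pass mutating dict build (membership test, then insert-or-append) by an arithmetic keypad-table lookup (KEYPAD[ord(c)-97]) and a two-pass grouping: compute all codes once, dedup them in first-occurrence order, and build each bucket by filtering the word/code pairs.
import Mathlib
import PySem

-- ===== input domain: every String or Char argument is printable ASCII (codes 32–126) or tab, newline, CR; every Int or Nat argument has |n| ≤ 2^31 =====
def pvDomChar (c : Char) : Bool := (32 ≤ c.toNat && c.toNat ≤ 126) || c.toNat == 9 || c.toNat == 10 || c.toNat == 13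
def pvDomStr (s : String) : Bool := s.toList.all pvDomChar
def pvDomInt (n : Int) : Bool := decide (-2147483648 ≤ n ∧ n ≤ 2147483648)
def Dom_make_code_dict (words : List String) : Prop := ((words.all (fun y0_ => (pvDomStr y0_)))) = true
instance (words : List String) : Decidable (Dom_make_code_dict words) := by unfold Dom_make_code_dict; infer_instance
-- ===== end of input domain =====

-- B replaces A's branch-chain letter lookup and single-pass mutating dict build by an
-- arithmetic keypad-table lookup and a two-pass grouping (dedup the codes, then filter per code);
-- same return value on every input on which A returns.

-- ===== PORT A =====
def letter_to_code (letter : Char) : Option String :=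
  if letter = 'a' ∨ letter = 'b' ∨ letter = 'c' then some "2"
  else if letter = 'd' ∨ letter = 'e' ∨ letter = 'f' then some "3"
  else if letter = 'g' ∨ letter = 'h' ∨ letter = 'i' then some "4"
  else if letter = 'j' ∨ letter = 'k' ∨ letter = 'l' then some "5"
  else if letter = 'm' ∨ letter = 'n' ∨ letter = 'o' then some "6"
  else if letter = 'p' ∨ letter = 'q' ∨ letter = 'r' ∨ letter = 's' then some "7"
  else if letter = 't' ∨ letter = 'u' ∨ letter = 'v' then some "8"
  else if letter = 'w' ∨ letter = 'x' ∨ letter = 'y' ∨ letter = 'z' then some "9"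
  else none

-- code += letter_to_code(letter); none = the TypeError Python raises on an unmapped letter
def word_to_code (word : String) : Option String :=
  word.toList.foldl
    (fun code letter =>
      match code, letter_to_code letter with
      | some c, some t => some (c ++ t)
      | _, _ => none)
    (some "")

def make_code_dict (words : List String) : List (String × List String) :=
  (words.foldl
    (fun code_dict word =>
      -- word_to_code is some under Pre_; .getD "" is never reached there
      let code := (word_to_code word).getD ""
      if code_dict.contains code = false then
        code_dict.insert code [word]
      else
        code_dict.modify code [] (fun l => l ++ [word]))
    PySem.Dict.empty).items

-- ===== PORT B =====
def KEYPAD : List Char := "22233344455566677778889999".toList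

-- "".join(KEYPAD[ord(c)-97] for c in w); none = the IndexError Python raises out of range
def code_chars (cs : List Char) : Option (List Char) :=
  match cs with
  | [] => some []
  | c :: rest =>
    match PySem.List.pyGet? KEYPAD ((c.toNat : Int) - 97), code_chars rest with
    | some d, some r => some (d :: r)
    | _, _ => none

-- code of one word; the .getD "" branch is never reached under Pre_
def code_of (w : String) : String := (String.ofList ((code_chars w.toList).getD []))

def make_code_dict_alt (words : List String) : List (String × List String) :=
  let codes := words.map code_of
  (PySem.List.dedup codes).map (fun code =>
    (code, ((words.zip codes).filter (fun p => p.2 == code)).map (fun p => p.1)))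

-- ===== PRECONDITION & SPEC =====
def lowercase : List Char :=
  ['a','b','c','d','e','f','g','h','i','j','k','l','m',
   'n','o','p','q','r','s','t','u','v','w','x','y','z']

-- Pre_ excludes exactly the inputs where some word has a character outside 'a'..'z',
-- on which Python A raises TypeError (letter_to_code returns None).
def Pre_make_code_dict (words : List String) : Prop :=
  words.all (fun w => w.toList.all (fun c => c ∈ lowercase)) = true
instance (words : List String) : Decidable (Pre_make_code_dict words) := by
  unfold Pre_make_code_dict; infer_instance

def pvWitness_make_code_dict : List String := ["ab", "a"]

def Spec_make_code_dict (words : List String) (out : List (String × List String)) : Prop := out = make_code_dict_alt words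
instance (words : List String) (out : List (String × List String)) : Decidable (Spec_make_code_dict words out) := by unfold Spec_make_code_dict; infer_instance

-- ===== CLAIM (what is proved, stated in full; the proofs are below) =====
def Claim_equal_make_code_dict : Prop := ∀ (words : List String), Dom_make_code_dict words → Pre_make_code_dict words → Spec_make_code_dict words (make_code_dict words)

-- ===== LEMMAS AND PROOFS =====

-- the common shape both programs reduce to: group `words` by the parallel list `codes`
def groupCodes (words codes : List String) : List (String × List String) :=
  (PySem.List.dedup codes).map (fun code =>
    (code, ((words.zip codes).filter (fun p => p.2 == code)).map (fun p => p.1)))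

theorem alt_eq_group (words : List String) :
    make_code_dict_alt words = groupCodes words (words.map code_of) := rfl

-- for a lowercase letter the branch chain and the keypad-table lookup give the same digit
theorem char_code (c : Char) (h : c ∈ lowercase) :
    ∃ d : Char, letter_to_code c = some (String.ofList [d]) ∧
      PySem.List.pyGet? KEYPAD ((c.toNat : Int) - 97) = some d := by
  fin_cases h <;> exact ⟨_, rfl, rfl⟩

-- A's left fold with accumulator vs B's right recursion over the same word
theorem fold_code (cs : List Char) (a : List Char) (h : ∀ c ∈ cs, c ∈ lowercase) :
    cs.foldl
      (fun code letter =>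
        match code, letter_to_code letter with
        | some c, some t => some (c ++ t)
        | _, _ => none)
      (some (String.ofList a))
    = (code_chars cs).map (fun r => String.ofList (a ++ r)) := by
  induction cs generalizing a with
  | nil => simp [code_chars]
  | cons c rest ih =>
      obtain ⟨d, hA, hB⟩ := char_code c (h c (by simp))
      have hmk : String.ofList a ++ String.ofList [d] = String.ofList (a ++ [d]) :=
        (String.ofList_append (l₁ := a) (l₂ := [d])).symm
      simp only [List.foldl_cons, hA, hmk]
      rw [ih (a ++ [d]) (fun x hx => h x (by simp [hx]))]
      simp only [code_chars, hB]
      cases code_chars rest <;> simp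

theorem key_eq (w : String) (h : w.toList.all (fun c => c ∈ lowercase) = true) :
    (word_to_code w).getD "" = code_of w := by
  have h' : ∀ c ∈ w.toList, c ∈ lowercase := by
    intro c hc; exact of_decide_eq_true (List.all_eq_true.mp h c hc)
  have := fold_code w.toList [] h'
  unfold word_to_code code_of
  rw [show (String.ofList ([] : List Char)) = "" from rfl] at this
  rw [this]
  cases code_chars w.toList <;> simp

-- A's branchy update is exactly `modify code [] (· ++ [word])`
theorem step_eq (d : PySem.Dict String (List String)) (code : String) (word : String) :
    (if d.contains code = false then d.insert code [word]
     else d.modify code [] (fun l => l ++ [word]))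
    = d.modify code [] (fun l => l ++ [word]) := by
  by_cases h : d.contains code = false
  · simp [h, PySem.Dict.modify, PySem.Dict.getD_of_not_contains d [] h]
  · simp [h]

-- the bucket of a code, computed from packed pairs vs from zip(words, codes)
theorem bucket_eq (key : String → String) (c : String) (words : List String) :
    ((words.map (fun w => (key w, w))).filter (fun p => p.1 == c)).map (fun p => p.2)
    = ((words.zip (words.map key)).filter (fun p => p.2 == c)).map (fun p => p.1) := by
  induction words with
  | nil => rfl
  | cons w ws ih =>
      simp only [List.map_cons, List.zip_cons_cons, List.filter_cons]
      by_cases h : key w = c <;> simp [h, ih]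

-- A's mutating loop produces the grouped form keyed by (word_to_code ·).getD ""
theorem a_eq_group (words : List String) :
    make_code_dict words = groupCodes words (words.map (fun w => (word_to_code w).getD "")) := by
  have hf : (fun (d : PySem.Dict String (List String)) (word : String) =>
      let code := (word_to_code word).getD ""
      if d.contains code = false then d.insert code [word]
      else d.modify code [] (fun l => l ++ [word]))
      = (fun (d : PySem.Dict String (List String)) (word : String) =>
          d.modify ((word_to_code word).getD "") [] (fun l => l ++ [word])) := by
    funext d word
    exact step_eq d _ word
  unfold make_code_dict groupCodes
  rw [hf]
  rw [show (words.foldl (fun d w => d.modify ((word_to_code w).getD "") [] (fun l => l ++ [w]))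
        PySem.Dict.empty)
      = ((words.map (fun w => ((word_to_code w).getD "", w))).foldl
          (fun d p => d.modify p.1 [] (fun l => l ++ [p.2])) PySem.Dict.empty) by
    simp [List.foldl_map]]
  set l := words.map (fun w => ((word_to_code w).getD "", w)) with hl
  have hnd : ((l.foldl (fun d p => d.modify p.1 [] (fun v => v ++ [p.2]))
      PySem.Dict.empty)).keys.Nodup :=
    PySem.Dict.nodup_keys_foldl_modify_key l Prod.fst []
      (fun _ p => fun v => v ++ [p.2]) PySem.Dict.empty (by simp)
  rw [PySem.Dict.items_eq_map_keys _ hnd []]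
  rw [PySem.Dict.keys_foldl_modify_key l Prod.fst [] (fun _ p => fun v => v ++ [p.2])]
  have hkeys : PySem.Set.update (PySem.Dict.empty : PySem.Dict String (List String)).keys
        (l.map Prod.fst)
      = PySem.List.dedup (words.map (fun w => (word_to_code w).getD "")) := by
    simp [hl, List.map_map, PySem.List.dedup_eq_ofList, PySem.Set.update, PySem.Set.ofList,
      Function.comp_def]
  rw [hkeys]
  apply List.map_congr_left
  intro c _
  rw [PySem.Dict.getD_foldl_modify_append]
  simp only [PySem.Dict.getD_empty, List.nil_append, hl]
  exact congrArg (Prod.mk c) (bucket_eq (fun w => (word_to_code w).getD "") c words)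

theorem make_code_dict_spec' (words : List String) (hpre : Pre_make_code_dict words) :
    make_code_dict words = make_code_dict_alt words := by
  have hcodes : words.map (fun w => (word_to_code w).getD "") = words.map code_of := by
    apply List.map_congr_left
    intro w hw
    exact key_eq w (List.all_eq_true.mp hpre w hw)
  rw [a_eq_group, hcodes, alt_eq_group]

-- ===== VERDICT (by name: the statement is the Claim_ definition above) =====
theorem make_code_dict_spec : Claim_equal_make_code_dict := by
  intro words _ hpre
  exact make_code_dict_spec' words hpre
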